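-- pv_equiv track=rewrite | github.com/jano31415/codejam | codeforces/807_round_div2/probb.py | solve
-- ===== SOURCE A (Python) =====
-- def solve(n,h):
--     first = False
--     count = 0
--     for i in range(n-1):
--         if h[i]!=0:
--             first=True
--         if first and h[i]==0:
--             count+=1
--     return count + sum(h) - h[-1]
-- ===== SOURCE B (Python) =====
-- def solve(n, h):
--     # Backward pass: a zero counts iff a nonzero precedes it, so scanning from
--     # the right, flush pending zeros into the answer at each nonzero; leftover
--     # pending zeros (the leading-zero run) are discarded.
--     ans = 0
--     pending = 0
--     for x in reversed(h[:max(n - 1, 0)]):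
--         if x == 0:
--             pending += 1
--         else:
--             ans += pending
--             pending = 0
--     return ans + sum(h) - h[-1]
-- ===== Notes on version B (the rewrite author's own statement) =====
-- stated objective: alternative
-- what changed: Replaces A's forward flag-and-counter loop by a backward pass that accumulates pending zeros and flushes them into the answer at each nonzero, discarding the trailing (i.e. leading) run; correct because a zero counts exactly when some nonzero precedes it.
import Mathlib
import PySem

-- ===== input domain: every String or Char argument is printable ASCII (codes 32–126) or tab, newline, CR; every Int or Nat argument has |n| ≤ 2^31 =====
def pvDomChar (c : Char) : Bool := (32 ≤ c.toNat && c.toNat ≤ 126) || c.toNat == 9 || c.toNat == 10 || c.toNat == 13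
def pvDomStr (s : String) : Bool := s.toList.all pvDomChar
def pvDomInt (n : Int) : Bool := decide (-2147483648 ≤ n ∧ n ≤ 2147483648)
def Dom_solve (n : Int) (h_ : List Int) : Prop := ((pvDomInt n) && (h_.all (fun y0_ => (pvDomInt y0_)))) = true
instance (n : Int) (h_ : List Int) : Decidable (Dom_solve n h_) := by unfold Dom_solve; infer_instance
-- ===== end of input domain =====

-- B replaces A's forward flag-and-counter loop by a backward pass with a pending-flush accumulator (objective: alternative).

-- ===== PORT A =====
-- one step of A's loop body: first = updated flag, then conditional count increment
def solveStep (p : Bool × Int) (x : Int) : Bool × Int :=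
  let first := if x ≠ 0 then true else p.1
  (first, if first ∧ x = 0 then p.2 + 1 else p.2)

def solve (n : Int) (h_ : List Int) : Int :=
  let st := (PySem.List.pyRange 0 (n - 1) 1).foldl
    (fun p i => solveStep p (PySem.List.pyGetD h_ i 0)) (false, 0)
  st.2 + h_.sum - PySem.List.pyGetD h_ (-1) 0

-- ===== PORT B =====
-- one step of B's backward loop: accumulate pending zeros, flush them at a nonzero
def bStep (p : Int × Int) (x : Int) : Int × Int :=
  if x = 0 then (p.1, p.2 + 1) else (p.1 + p.2, 0)

def solve_alt (n : Int) (h_ : List Int) : Int :=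
  let pre := PySem.List.slice h_ none (some (max (n - 1) 0))
  let st := pre.reverse.foldl bStep (0, 0)
  st.1 + h_.sum - PySem.List.pyGetD h_ (-1) 0

-- ===== PRECONDITION & SPEC =====
-- A raises IndexError when h is empty (h[-1]) or when n-1 exceeds len(h) (h[i]); exactly those inputs are excluded.
def Pre_solve (n : Int) (h_ : List Int) : Prop := h_ ≠ [] ∧ n - 1 ≤ (h_.length : Int)
instance (n : Int) (h_ : List Int) : Decidable (Pre_solve n h_) := by unfold Pre_solve; infer_instance
def pvWitness_solve : Int × List Int := (4, [0, 1, 0, 2])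

def Spec_solve (n : Int) (h_ : List Int) (out : Int) : Prop := out = solve_alt n h_
instance (n : Int) (h_ : List Int) (out : Int) : Decidable (Spec_solve n h_ out) := by unfold Spec_solve; infer_instance

-- ===== CLAIM (what is proved, stated in full; the proofs are below) =====
def Claim_equal_solve : Prop := ∀ (n : Int) (h_ : List Int), Dom_solve n h_ → Pre_solve n h_ → Spec_solve n h_ (solve n h_)

-- ===== LEMMAS AND PROOFS =====

-- number of zeros strictly after the first nonzero element
def zAfter : List Int → Int
  | [] => 0
  | x :: t => if x = 0 then zAfter t else (t.count 0 : Int)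

-- length of the leading run of zeros
def leadZ : List Int → Int
  | [] => 0
  | x :: t => if x = 0 then leadZ t + 1 else 0

theorem count_eq_zAfter_add_leadZ (l : List Int) :
    (l.count 0 : Int) = zAfter l + leadZ l := by
  induction l with
  | nil => simp [zAfter, leadZ]
  | cons x t ih =>
    by_cases hx : x = 0 <;>
      simp [zAfter, leadZ, hx, List.count_cons, ih] <;> ring_nf

-- once the flag is true, A's loop just counts zeros
theorem foldl_step_true (l : List Int) (c : Int) :
    (l.foldl solveStep (true, c)).2 = c + (l.count 0 : Int) := by
  induction l generalizing c with
  | nil => simp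
  | cons x t ih =>
    by_cases hx : x = 0 <;>
      simp [solveStep, hx, ih] <;> ring

-- A's loop computes the zeros-after-first-nonzero count
theorem foldl_step_false (l : List Int) :
    (l.foldl solveStep (false, 0)).2 = zAfter l := by
  induction l with
  | nil => simp [zAfter]
  | cons x t ih =>
    by_cases hx : x = 0
    · simpa [solveStep, hx, zAfter] using ih
    · simp [solveStep, hx, zAfter, foldl_step_true]

-- B's backward loop: answer = zeros after the first nonzero, pending = leading zeros
theorem foldl_bStep_reverse (l : List Int) :
    l.reverse.foldl bStep (0, 0) = (zAfter l, leadZ l) := by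
  rw [List.foldl_reverse]
  induction l with
  | nil => simp [zAfter, leadZ]
  | cons x t ih =>
    rw [List.foldr_cons, ih]
    by_cases hx : x = 0
    · simp [bStep, hx, zAfter, leadZ]
    · simp [bStep, hx, zAfter, leadZ, count_eq_zAfter_add_leadZ]

-- A's range-indexed fold is the fold over the prefix take (n-1) of h
theorem foldl_range_eq_take (n : Int) (h_ : List Int) (hle : n - 1 ≤ (h_.length : Int)) :
    (PySem.List.pyRange 0 (n - 1) 1).foldl
      (fun p i => solveStep p (PySem.List.pyGetD h_ i 0)) (false, 0)
    = (h_.take (n - 1).toNat).foldl solveStep (false, 0) := by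
  by_cases hn : n - 1 ≤ 0
  · rw [PySem.List.pyRange_one_eq_nil hn]
    rw [show (n - 1).toNat = 0 by omega]
    simp
  · rw [not_le] at hn
    have hlen : ((h_.take (n - 1).toNat).length : Int) = n - 1 := by
      simp; omega
    have := PySem.List.foldl_pyRange_zero_pyGetD' (h_.take (n - 1).toNat) (0 : Int)
      solveStep ((false, 0) : Bool × Int)
    rw [hlen] at this
    rw [← this]
    apply PySem.List.foldl_congr_mem
    intro acc x hx
    have hmem := (PySem.List.mem_pyRange_one).1 hx
    congr 1
    rw [PySem.List.pyGetD_eq_getElem h_ 0 hmem.1 (by omega),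
        PySem.List.pyGetD_eq_getElem (h_.take (n - 1).toNat) 0 hmem.1 (by simp; omega),
        List.getElem_take]

-- ===== VERDICT (by name: the statement is the Claim_ definition above) =====
theorem solve_spec : Claim_equal_solve := by
  intro n h_ _ hpre
  simp only [Spec_solve, solve, solve_alt]
  obtain ⟨hne, hle⟩ := hpre
  have hmax : max (n - 1) 0 = ((n - 1).toNat : Int) := by omega
  rw [hmax, PySem.List.slice_to_natCast,
      foldl_range_eq_take n h_ hle, foldl_step_false, foldl_bStep_reverse]
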